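-- pv_equiv track=rewrite | github.com/flakepowders/2022-Spring-CS1-Final-Mock-Exam-Solutions | A04_skyscraper.py | numberOfSkyscrapers
-- ===== SOURCE A (Python) =====
-- def numberOfSkyscrapers(L):
--     N = len(L)
--     # 가로줄의 수를 저장합니다.
--     M = len(L[0])
--     # 세로줄의 수를 저장합니다.
--     result = [0] * M
--     # 결과값을 저장합니다. 결과값은 남쪽에서 보았을 때 세로줄마다 보이는 건물의 수이므로, 길이는 M입니다.
--     for j in range(M):
--         maxHeight = 0
--         # 일단 그 줄에서 보이는 최대 높이를 0으로 설정합니다.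
--         for i in range(N-1, -1, -1):
--             # 남쪽에서 북쪽 방향으로, 건물들을 하나씩 검사합니다.
--             if L[i][j] > maxHeight:
--                 # 만약 이 건물이 그 줄에서 보이는 최대 높이보다 높다면,
--                 maxHeight = L[i][j]
--                 # 그 줄에서 보이는 최대 높이는 그 건물의 높이로 갱신해줍니다.
--                 result[j] += 1
--                 # 그 줄에서 보이는 건물의 개수도 1만큼 늘려 줍니다.
--     return result
-- ===== SOURCE B (Python) =====
-- def numberOfSkyscrapers(L):
--     # Per column (taken south to north via zip over the reversed rows): build the
--     # prefix-maximum sequence starting from 0; a building is visible exactly when it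
--     # raises the running maximum, so the answer is the number of distinct values in
--     # that (non-decreasing) sequence, minus one for the initial 0.
--     result = []
--     for col in zip(*reversed(L)):
--         ms = [0]
--         for h in col:
--             ms.append(max(ms[-1], h))
--         result.append(len(set(ms)) - 1)
--     return result
-- ===== Notes on version B (the rewrite author's own statement) =====
-- stated objective: alternative
-- what changed: B transposes the grid with zip over the reversed rows and, per column, builds the prefix-maximum sequence and counts visible buildings as the number of distinct values of that sequence via a set (len(set(ms))-1), instead of A's nested index loops with a conditional counter increment.
import Mathlib
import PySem

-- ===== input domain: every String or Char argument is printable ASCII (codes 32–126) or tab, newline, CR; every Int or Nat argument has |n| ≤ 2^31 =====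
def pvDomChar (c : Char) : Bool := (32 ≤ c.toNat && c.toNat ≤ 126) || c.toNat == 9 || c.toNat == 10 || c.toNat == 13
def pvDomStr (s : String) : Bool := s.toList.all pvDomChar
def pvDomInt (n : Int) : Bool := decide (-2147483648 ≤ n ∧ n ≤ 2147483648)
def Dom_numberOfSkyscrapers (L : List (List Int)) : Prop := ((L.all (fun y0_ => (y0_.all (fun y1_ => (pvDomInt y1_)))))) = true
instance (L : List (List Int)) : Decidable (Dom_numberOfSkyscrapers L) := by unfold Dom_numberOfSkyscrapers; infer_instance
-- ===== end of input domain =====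

-- B replaces A's nested index loops with a conditional counter by a zip-transpose and,
-- per column, the prefix-maximum sequence whose distinct-value count (a set) minus one
-- is the answer (objective: alternative).

-- ===== PORT A =====
-- inner loop 'for i in range(N-1, -1, -1)' with state (maxHeight, result[j])
def pvAcol (L : List (List Int)) (N : Int) (j : Int) : Int :=
  ((PySem.List.pyRange (N - 1) (-1) (-1)).foldl
    (fun (st : Int × Int) i =>
      let h := PySem.List.pyGetD (PySem.List.pyGetD L i []) j 0
      if h > st.1 then (h, st.2 + 1) else st)
    (0, 0)).2

def numberOfSkyscrapers (L : List (List Int)) : List Int :=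
  let N : Int := L.length
  let M : Int := (L.headD []).length
  -- 'result = [0]*M; for j in range(M): … result[j] += 1': each result[j] is written
  -- only in iteration j, so the outer loop is transcribed as a map over range(M).
  (PySem.List.pyRange 0 M 1).map (fun j => pvAcol L N j)

-- ===== PORT B =====
-- zip(*rows): min row length (Python zip truncates to the shortest iterable)
def pvMinLen (rows : List (List Int)) : Nat :=
  match rows with
  | [] => 0
  | r :: rs => rs.foldl (fun m x => min m x.length) r.length
-- zip(*rows) as a list of columns; exact since j < every row's length, so getD never defaults
def pvZipStar (rows : List (List Int)) : List (List Int) :=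
  (List.range (pvMinLen rows)).map (fun j => rows.map (fun r => r.getD j 0))
-- the body of B's outer loop: ms = [0]; for h in col: ms.append(max(ms[-1], h)); len(set(ms)) - 1
-- ms is always nonempty, so ms[-1] is exactly getLastD
def pvColCount (col : List Int) : Int :=
  let ms := col.foldl (fun ms h => ms ++ [max (ms.getLastD 0) h]) [(0 : Int)]
  ((PySem.Set.ofList ms).length : Int) - 1

def numberOfSkyscrapers_alt (L : List (List Int)) : List Int :=
  (pvZipStar L.reverse).map pvColCount

-- ===== PRECONDITION & SPEC =====
-- Pre_ excludes exactly the inputs where Python A raises IndexError: empty L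
-- (len(L[0])) and rows shorter than the first row (L[i][j] out of range).
def Pre_numberOfSkyscrapers (L : List (List Int)) : Prop :=
  L ≠ [] ∧ ∀ row ∈ L, (L.headD []).length ≤ row.length
instance (L : List (List Int)) : Decidable (Pre_numberOfSkyscrapers L) := by
  unfold Pre_numberOfSkyscrapers; infer_instance

def pvWitness_numberOfSkyscrapers : List (List Int) := [[3, 1], [2, 4]]

def Spec_numberOfSkyscrapers (L : List (List Int)) (out : List Int) : Prop := out = numberOfSkyscrapers_alt L
instance (L : List (List Int)) (out : List Int) : Decidable (Spec_numberOfSkyscrapers L out) := by unfold Spec_numberOfSkyscrapers; infer_instance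

-- ===== CLAIM (what is proved, stated in full; the proofs are below) =====
def Claim_equal_numberOfSkyscrapers : Prop := ∀ (L : List (List Int)), Dom_numberOfSkyscrapers L → Pre_numberOfSkyscrapers L → Spec_numberOfSkyscrapers L (numberOfSkyscrapers L)

-- ===== LEMMAS AND PROOFS =====

-- number of strict records of xs against the running maximum starting at m
def pvRecs (m : Int) (xs : List Int) : Nat :=
  match xs with
  | [] => 0
  | h :: t => if h > m then pvRecs h t + 1 else pvRecs m t

theorem pvRecs_nil (m : Int) : pvRecs m [] = 0 := rfl
theorem pvRecs_cons (m h : Int) (t : List Int) :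
    pvRecs m (h :: t) = if h > m then pvRecs h t + 1 else pvRecs m t := rfl

-- A's scalar fold counts records
theorem pvFold_recs (xs : List Int) : ∀ (m c : Int),
    (xs.foldl (fun (q : Int × Int) h => if h > q.1 then (h, q.2 + 1) else q) (m, c)).2
      = c + (pvRecs m xs : Int) := by
  induction xs with
  | nil => intro m c; simp [pvRecs_nil]
  | cons h t ih =>
      intro m c
      by_cases hc : h > m
      · simp [pvRecs_cons, hc, ih]; ring
      · simp [pvRecs_cons, hc, ih]

-- B's append loop builds the scanl of max
theorem pvMs_scanl (xs : List Int) : ∀ (pre : List Int) (m : Int),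
    xs.foldl (fun ms h => ms ++ [max (ms.getLastD 0) h]) (pre ++ [m])
      = pre ++ List.scanl max m xs := by
  induction xs with
  | nil => intro pre m; simp
  | cons h t ih =>
      intro pre m
      have hlast : (pre ++ [m]).getLastD 0 = m := by simp
      simp only [List.foldl_cons, hlast]
      have : pre ++ [m] ++ [max m h] = (pre ++ [m]) ++ [max m h] := by simp
      rw [this, ih (pre ++ [m]) (max m h)]
      simp [List.scanl]

theorem pvMem_scanl_ge (xs : List Int) : ∀ (m x : Int), x ∈ List.scanl max m xs → m ≤ x := by
  induction xs with
  | nil => intro m x hx; simp [List.scanl] at hx; omega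
  | cons h t ih =>
      intro m x hx
      simp only [List.scanl_cons, List.mem_cons] at hx
      rcases hx with rfl | hx
      · omega
      · have := ih (max m h) x hx; omega

theorem pvSelf_mem_scanl (xs : List Int) (m : Int) : m ∈ List.scanl max m xs := by
  cases xs <;> simp [List.scanl]

-- a last-occurrence dedup, easier for induction; its length equals PySem.Set.ofList's
def pvDedup (l : List Int) : List Int :=
  match l with
  | [] => []
  | a :: t => if a ∈ t then pvDedup t else a :: pvDedup t

theorem pvMem_pvDedup (l : List Int) (x : Int) : x ∈ pvDedup l ↔ x ∈ l := by
  induction l with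
  | nil => simp [pvDedup]
  | cons a t ih =>
      by_cases h : a ∈ t
      · simp [pvDedup, h, ih]
        intro hx; rw [hx]; exact h
      · simp [pvDedup, h, ih]

theorem pvNodup_pvDedup (l : List Int) : (pvDedup l).Nodup := by
  induction l with
  | nil => simp [pvDedup]
  | cons a t ih =>
      by_cases h : a ∈ t
      · simpa [pvDedup, h] using ih
      · simp [pvDedup, h, ih]
        intro hx; exact h ((pvMem_pvDedup t a).mp hx)

theorem pvOfList_length (l : List Int) : (PySem.Set.ofList l).length = (pvDedup l).length := by
  have hperm : (PySem.Set.ofList l).Perm (pvDedup l) := by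
    refine (List.perm_ext_iff_of_nodup (PySem.Set.nodup_ofList l) (pvNodup_pvDedup l)).mpr ?_
    intro x
    rw [PySem.Set.mem_ofList, pvMem_pvDedup]
  exact hperm.length_eq

theorem pvDedup_scanl_length (xs : List Int) : ∀ (m : Int),
    (pvDedup (List.scanl max m xs)).length = pvRecs m xs + 1 := by
  induction xs with
  | nil => intro m; simp [List.scanl, pvDedup, pvRecs_nil]
  | cons h t ih =>
      intro m
      by_cases hc : h > m
      · have hmax : max m h = h := by omega
        have hnm : m ∉ List.scanl max h t := by
          intro hmem; have := pvMem_scanl_ge t h m hmem; omega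
        simp [List.scanl_cons, hmax, pvDedup, hnm, ih, pvRecs_cons, hc]
      · have hmax : max m h = m := by omega
        have hm : m ∈ List.scanl max m t := pvSelf_mem_scanl t m
        simp [List.scanl_cons, hmax, pvDedup, hm, ih, pvRecs_cons, hc]

-- the complete per-column equality, B side
theorem pvColCount_eq (xs : List Int) : pvColCount xs = (pvRecs 0 xs : Int) := by
  have hdef : pvColCount xs
      = ((PySem.Set.ofList (xs.foldl (fun ms h => ms ++ [max (ms.getLastD 0) h])
          (([] : List Int) ++ [(0 : Int)]))).length : Int) - 1 := rfl
  rw [hdef, pvMs_scanl xs [] 0, List.nil_append, pvOfList_length, pvDedup_scanl_length]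
  push_cast; ring

-- per-column scalar fold over a row list, Nat index (A side restated over L.reverse)
def pvG (rs : List (List Int)) (j : Nat) (p : Int × Int) : Int × Int :=
  rs.foldl (fun q row =>
    let h := row.getD j 0
    if h > q.1 then (h, q.2 + 1) else q) p

-- A's countdown index loop is the scalar fold over L.reverse
theorem pvAcol_eq (L : List (List Int)) (j : Nat) :
    pvAcol L L.length j = (pvG L.reverse j (0, 0)).2 := by
  unfold pvAcol pvG
  rw [show PySem.List.pyRange ((L.length : Int) - 1) (-1) (-1)
        = (PySem.List.pyRange 0 (L.length : Int) 1).reverse by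
      rw [PySem.List.pyRange_neg_one_eq_reverse]; norm_num]
  rw [show (PySem.List.pyRange 0 (L.length : Int) 1).reverse.foldl
        (fun (st : Int × Int) i =>
          let h := PySem.List.pyGetD (PySem.List.pyGetD L i []) (j : Int) 0
          if h > st.1 then (h, st.2 + 1) else st) (0, 0)
      = ((PySem.List.pyRange 0 (L.length : Int) 1).map
          (fun i => PySem.List.pyGetD L i [])).reverse.foldl
          (fun (st : Int × Int) r =>
            let h := PySem.List.pyGetD r (j : Int) 0
            if h > st.1 then (h, st.2 + 1) else st) (0, 0) by
      rw [← List.map_reverse, List.foldl_map]]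
  rw [PySem.List.map_pyGetD_pyRange_zero']
  simp [PySem.List.pyGetD_natCast]

theorem pvG_eq_fold_col (rs : List (List Int)) (j : Nat) (p : Int × Int) :
    pvG rs j p = (rs.map (fun r => r.getD j 0)).foldl
      (fun (q : Int × Int) h => if h > q.1 then (h, q.2 + 1) else q) p := by
  rw [pvG, List.foldl_map]

-- foldl min bounds
theorem pvFoldMin_ge (rs : List (List Int)) : ∀ (a : Nat) (m : Nat), m ≤ a →
    (∀ x ∈ rs, m ≤ x.length) → m ≤ rs.foldl (fun m x => min m x.length) a := by
  induction rs with
  | nil => intro a m ha _; simpa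
  | cons r t ih =>
      intro a m ha hall
      simp only [List.foldl_cons]
      exact ih _ m (le_min ha (hall r (by simp))) (fun x hx => hall x (by simp [hx]))

theorem pvFoldMin_le_init (rs : List (List Int)) : ∀ (a : Nat),
    rs.foldl (fun m x => min m x.length) a ≤ a := by
  induction rs with
  | nil => intro a; simp
  | cons r t ih =>
      intro a
      simp only [List.foldl_cons]
      exact le_trans (ih _) (min_le_left _ _)

theorem pvFoldMin_le_mem (rs : List (List Int)) : ∀ (a : Nat) (x : List Int), x ∈ rs →
    rs.foldl (fun m x => min m x.length) a ≤ x.length := by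
  induction rs with
  | nil => intro a x hx; simp at hx
  | cons r t ih =>
      intro a x hx
      simp only [List.foldl_cons]
      rcases List.mem_cons.mp hx with rfl | hx
      · exact le_trans (pvFoldMin_le_init t _) (min_le_right _ _)
      · exact ih _ x hx

theorem pvMinLen_eq (rows : List (List Int)) (m : Nat)
    (hall : ∀ r ∈ rows, m ≤ r.length) (hw : ∃ r ∈ rows, r.length = m) :
    pvMinLen rows = m := by
  obtain ⟨w, hwmem, hwlen⟩ := hw
  cases rows with
  | nil => simp at hwmem
  | cons r rs =>
      unfold pvMinLen
      apply le_antisymm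
      · rcases List.mem_cons.mp hwmem with rfl | hwm
        · rw [← hwlen]; exact pvFoldMin_le_init rs _
        · rw [← hwlen]; exact pvFoldMin_le_mem rs _ w hwm
      · exact pvFoldMin_ge rs r.length m (hall r (by simp)) (fun x hx => hall x (by simp [hx]))

theorem numberOfSkyscrapers_spec' (L : List (List Int))
    (hpre : Pre_numberOfSkyscrapers L) :
    numberOfSkyscrapers L = numberOfSkyscrapers_alt L := by
  obtain ⟨hne, hrows⟩ := hpre
  set M : Nat := (L.headD []).length with hM
  have hmin : pvMinLen L.reverse = M := by
    apply pvMinLen_eq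
    · intro r hr; exact hrows r (List.mem_reverse.mp hr)
    · exact ⟨L.headD [], List.mem_reverse.mpr (by cases L with
        | nil => exact absurd rfl hne
        | cons a t => simp), rfl⟩
  simp only [numberOfSkyscrapers, numberOfSkyscrapers_alt, pvZipStar, hmin, ← hM]
  rw [show PySem.List.pyRange 0 (M : Int) 1
        = (List.range M).map (fun k : Nat => (k : Int)) by
      rw [PySem.List.pyRange_one]; simp]
  rw [List.map_map, List.map_map]
  apply List.map_congr_left
  intro j _
  simp only [Function.comp]
  rw [show ((j : Nat) : Int) = (j : Int) from rfl]
  rw [pvAcol_eq L j, pvG_eq_fold_col, pvColCount_eq, pvFold_recs]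
  ring

-- ===== VERDICT (by name: the statement is the Claim_ definition above) =====
theorem numberOfSkyscrapers_spec : Claim_equal_numberOfSkyscrapers := by
  intro L _ hpre
  exact numberOfSkyscrapers_spec' L hpre
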